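-- pv_equiv track=rewrite | github.com/TimNekk/cyberpunk-hack | combinations_generator.py | get_lines_4
-- ===== SOURCE A (Python) =====
-- def get_lines_4(size):
--     lines = []
--     i0 = 0
--     for i1 in range(size):
--         buffer_temp = 4
--         while buffer_temp != 0:
--             for i2 in range(size):
--                 if i2 == i0:
--                     continue
--
--                 for i3 in range(size):
--                     if i3 == i1:
--                         continue
--
--                     for i4 in range(size):
--                         i_all = ((i1, i0), (i1, i2), (i3, i2), (i3, i4))
--
--                         if i4 == i2 or len(i_all) != len(set(i_all)):
--                             continue
--
--                         line = [i0, i1, i2, i3, i4]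
--
--                         lines.append(line)
--             buffer_temp -= 1
--     return lines
-- ===== SOURCE B (Python) =====
-- def get_lines_4(size):
--     # Rank decoding: the result is exactly 4*size*(size-1)^3 rows; decode the
--     # k-th row directly by mixed-radix divmod instead of nested filtered loops.
--     if size <= 1:
--         return []
--     m = size - 1
--     total = 4 * size * m * m * m
--     lines = []
--     for k in range(total):
--         q, t4 = divmod(k, m)
--         q, t3 = divmod(q, m)
--         q, t2 = divmod(q, m)
--         i1 = q // 4
--         i2 = t2 + 1
--         i3 = t3 if t3 < i1 else t3 + 1
--         i4 = t4 if t4 < i2 else t4 + 1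
--         lines.append([0, i1, i2, i3, i4])
--     return lines
-- ===== Notes on version B (the rewrite author's own statement) =====
-- stated objective: alternative
-- what changed: B replaces the nested filtered loops (re-run four times by a while-counter, with a per-row set-dedup test) by rank decoding: it computes the exact row count (four times size times the cube of size-minus-one) and produces the k-th row directly with mixed-radix divmod, mapping the skip-guards on the third and fifth indices into unit index shifts.
import Mathlib
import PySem

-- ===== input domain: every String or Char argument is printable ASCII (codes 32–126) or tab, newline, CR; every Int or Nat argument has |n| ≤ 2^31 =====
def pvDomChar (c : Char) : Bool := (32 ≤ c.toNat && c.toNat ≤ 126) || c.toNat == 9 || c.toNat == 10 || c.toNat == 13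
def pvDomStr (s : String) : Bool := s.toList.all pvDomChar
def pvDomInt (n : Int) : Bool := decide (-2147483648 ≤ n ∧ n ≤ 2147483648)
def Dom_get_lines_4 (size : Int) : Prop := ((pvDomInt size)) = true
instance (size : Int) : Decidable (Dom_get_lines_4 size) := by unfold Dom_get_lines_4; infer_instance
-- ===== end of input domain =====

-- B replaces A's repeated nested filtered loops by rank decoding: it computes the exact
-- row count and builds the k-th row directly by mixed-radix divmod (same cost, flat structure).

-- ===== PORT A =====
-- one pass of the while-body: the three nested for-loops appending to `lines`
def pvA_body (size i1 : Int) (lines : List (List Int)) : List (List Int) :=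
  (PySem.List.pyRange 0 size 1).foldl (fun acc i2 =>
    if i2 = 0 then acc else
    (PySem.List.pyRange 0 size 1).foldl (fun acc2 i3 =>
      if i3 = i1 then acc2 else
      (PySem.List.pyRange 0 size 1).foldl (fun acc3 i4 =>
        if i4 = i2 ∨ (4:Nat) ≠ (PySem.Set.ofList [(i1,(0:Int)),(i1,i2),(i3,i2),(i3,i4)]).length
        then acc3 else acc3 ++ [[0, i1, i2, i3, i4]]) acc2) acc) lines

-- 'while buffer_temp != 0: … buffer_temp -= 1' starting from the literal 4: countdown recursion
def pvA_while (size i1 : Int) (lines : List (List Int)) : Nat → List (List Int)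
  | 0 => lines
  | n+1 => pvA_while size i1 (pvA_body size i1 lines) n

def get_lines_4 (size : Int) : List (List Int) :=
  (PySem.List.pyRange 0 size 1).foldl (fun lines i1 => pvA_while size i1 lines 4) []

-- ===== PORT B =====
-- the loop body of Source B: decode row k of the mixed-radix rank (divmod = (//, %), m > 0 at every call)
def pvB_row (m k : Int) : List Int :=
  let q1 := PySem.Int.floordiv k m
  let t4 := PySem.Int.mod k m
  let q2 := PySem.Int.floordiv q1 m
  let t3 := PySem.Int.mod q1 m
  let q3 := PySem.Int.floordiv q2 m
  let t2 := PySem.Int.mod q2 m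
  let i1 := PySem.Int.floordiv q3 4
  let i2 := t2 + 1
  let i3 := if t3 < i1 then t3 else t3 + 1
  let i4 := if t4 < i2 then t4 else t4 + 1
  [0, i1, i2, i3, i4]

def get_lines_4_alt (size : Int) : List (List Int) :=
  if size ≤ 1 then [] else
    let m := size - 1
    let total := 4 * size * m * m * m
    (PySem.List.pyRange 0 total 1).foldl (fun lines k => lines ++ [pvB_row m k]) []

-- ===== PRECONDITION & SPEC =====
def Spec_get_lines_4 (size : Int) (out : List (List Int)) : Prop := out = get_lines_4_alt size
instance (size : Int) (out : List (List Int)) : Decidable (Spec_get_lines_4 size out) := by unfold Spec_get_lines_4; infer_instance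

-- ===== CLAIM (what is proved, stated in full; the proofs are below) =====
def Claim_equal_get_lines_4 : Prop := ∀ (size : Int), Dom_get_lines_4 size → Spec_get_lines_4 size (get_lines_4 size)

-- ===== LEMMAS AND PROOFS =====

-- common normal form both ports are reduced to
def pvBlock (size i1 : Int) : List (List Int) :=
  (PySem.List.pyRange 1 size 1).flatMap (fun i2 =>
    ((PySem.List.pyRange 0 size 1).filter (fun i3 => i3 != i1)).flatMap (fun i3 =>
      ((PySem.List.pyRange 0 size 1).filter (fun i4 => i4 != i2)).map (fun i4 =>
        [0, i1, i2, i3, i4])))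

def pvNest (size : Int) : List (List Int) :=
  (PySem.List.pyRange 0 size 1).flatMap (fun i1 =>
    (PySem.List.pyRange 0 4 1).flatMap (fun _ => pvBlock size i1))

-- ---- A-side reduction to pvNest ----

-- 'for x in l: if x == c: continue; out.extend(g(x))' is append-filter-flatMap
lemma pv_foldl_skip {β : Type} (l : List Int) (c : Int) (g : Int → List β) (acc : List β) :
    l.foldl (fun a x => if x = c then a else a ++ g x) acc
      = acc ++ (l.filter (fun x => x != c)).flatMap g := by
  induction l generalizing acc with
  | nil => simp
  | cons y ys ih =>
    simp only [List.foldl_cons, List.filter_cons]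
    by_cases h : y = c <;> simp [h, ih]

lemma pv_foldl_skip_map {β : Type} (l : List Int) (c : Int) (f : Int → β) (acc : List β) :
    l.foldl (fun a x => if x = c then a else a ++ [f x]) acc
      = acc ++ (l.filter (fun x => x != c)).map f := by
  rw [pv_foldl_skip]
  congr 1
  induction (List.filter (fun x => x != c) l) with
  | nil => rfl
  | cons y ys ih => simp [List.flatMap_cons, ih]

-- under the three loop guards the four index pairs are pairwise distinct:
-- A's set-dedup test never fires
lemma pv_guard (i1 i2 i3 i4 : Int) (h2 : i2 ≠ 0) (h3 : i3 ≠ i1) (h4 : i4 ≠ i2) :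
    (4:Nat) = (PySem.Set.ofList [(i1,(0:Int)),(i1,i2),(i3,i2),(i3,i4)]).length := by
  simp [PySem.Set.ofList, PySem.Set.add, PySem.Set.contains, h2, h3, h4, Prod.ext_iff]

lemma pv_filter_range (size : Int) :
    (PySem.List.pyRange 0 size 1).filter (fun x => x != 0) = PySem.List.pyRange 1 size 1 := by
  by_cases h : 0 < size
  · rw [PySem.List.pyRange_one_cons h]
    simp only [List.filter_cons, bne_self_eq_false, Bool.false_eq_true, if_false]
    refine List.filter_eq_self.mpr ?_
    intro x hx
    have := (PySem.List.mem_pyRange_one.mp hx).1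
    simp [bne_iff_ne]; omega
  · rw [PySem.List.pyRange_one_eq_nil (by omega), PySem.List.pyRange_one_eq_nil (by omega)]
    rfl

lemma pv_inner4 (size i1 i2 i3 : Int) (h2 : i2 ≠ 0) (h3 : i3 ≠ i1) (acc : List (List Int)) :
    (PySem.List.pyRange 0 size 1).foldl (fun acc3 i4 =>
        if i4 = i2 ∨ (4:Nat) ≠ (PySem.Set.ofList [(i1,(0:Int)),(i1,i2),(i3,i2),(i3,i4)]).length
        then acc3 else acc3 ++ [[0, i1, i2, i3, i4]]) acc
      = acc ++ ((PySem.List.pyRange 0 size 1).filter (fun i4 => i4 != i2)).map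
          (fun i4 => [0, i1, i2, i3, i4]) := by
  rw [show (fun (acc3 : List (List Int)) i4 =>
        if i4 = i2 ∨ (4:Nat) ≠ (PySem.Set.ofList [(i1,(0:Int)),(i1,i2),(i3,i2),(i3,i4)]).length
        then acc3 else acc3 ++ [[0, i1, i2, i3, i4]])
      = (fun acc3 i4 => if i4 = i2 then acc3 else acc3 ++ [[0, i1, i2, i3, i4]]) from ?_,
    pv_foldl_skip_map]
  funext acc3 i4
  by_cases h4 : i4 = i2
  · simp [h4]
  · simp [h4, pv_guard i1 i2 i3 i4 h2 h3 h4]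

lemma pv_inner3 (size i1 i2 : Int) (h2 : i2 ≠ 0) (acc : List (List Int)) :
    (PySem.List.pyRange 0 size 1).foldl (fun acc2 i3 =>
      if i3 = i1 then acc2 else
      (PySem.List.pyRange 0 size 1).foldl (fun acc3 i4 =>
        if i4 = i2 ∨ (4:Nat) ≠ (PySem.Set.ofList [(i1,(0:Int)),(i1,i2),(i3,i2),(i3,i4)]).length
        then acc3 else acc3 ++ [[0, i1, i2, i3, i4]]) acc2) acc
      = acc ++ ((PySem.List.pyRange 0 size 1).filter (fun i3 => i3 != i1)).flatMap (fun i3 =>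
          ((PySem.List.pyRange 0 size 1).filter (fun i4 => i4 != i2)).map
            (fun i4 => [0, i1, i2, i3, i4])) := by
  rw [show (fun (acc2 : List (List Int)) i3 =>
      if i3 = i1 then acc2 else
      (PySem.List.pyRange 0 size 1).foldl (fun acc3 i4 =>
        if i4 = i2 ∨ (4:Nat) ≠ (PySem.Set.ofList [(i1,(0:Int)),(i1,i2),(i3,i2),(i3,i4)]).length
        then acc3 else acc3 ++ [[0, i1, i2, i3, i4]]) acc2)
      = (fun acc2 i3 => if i3 = i1 then acc2 else acc2 ++
          ((PySem.List.pyRange 0 size 1).filter (fun i4 => i4 != i2)).map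
            (fun i4 => [0, i1, i2, i3, i4])) from ?_,
    pv_foldl_skip]
  funext acc2 i3
  by_cases h3 : i3 = i1
  · simp [h3]
  · simp only [h3, if_false]
    exact pv_inner4 size i1 i2 i3 h2 h3 acc2

-- one while-pass appends exactly the block
lemma pv_body_eq (size i1 : Int) (lines : List (List Int)) :
    pvA_body size i1 lines = lines ++ pvBlock size i1 := by
  unfold pvA_body pvBlock
  rw [← pv_filter_range size]
  rw [show (fun (acc : List (List Int)) i2 =>
      if i2 = 0 then acc else
      (PySem.List.pyRange 0 size 1).foldl (fun acc2 i3 =>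
        if i3 = i1 then acc2 else
        (PySem.List.pyRange 0 size 1).foldl (fun acc3 i4 =>
          if i4 = i2 ∨ (4:Nat) ≠ (PySem.Set.ofList [(i1,(0:Int)),(i1,i2),(i3,i2),(i3,i4)]).length
          then acc3 else acc3 ++ [[0, i1, i2, i3, i4]]) acc2) acc)
      = (fun acc i2 => if i2 = 0 then acc else acc ++
          ((PySem.List.pyRange 0 size 1).filter (fun i3 => i3 != i1)).flatMap (fun i3 =>
            ((PySem.List.pyRange 0 size 1).filter (fun i4 => i4 != i2)).map
              (fun i4 => [0, i1, i2, i3, i4]))) from ?_,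
    pv_foldl_skip]
  funext acc i2
  by_cases h2 : i2 = 0
  · simp [h2]
  · simp only [h2, if_false]
    exact pv_inner3 size i1 i2 h2 acc

lemma pv_A_eq_nest (size : Int) : get_lines_4 size = pvNest size := by
  unfold get_lines_4 pvNest
  have h : ∀ i1 (lines : List (List Int)),
      pvA_while size i1 lines 4 = lines ++ (PySem.List.pyRange 0 4 1).flatMap (fun _ => pvBlock size i1) := by
    intro i1 lines
    rw [show PySem.List.pyRange 0 4 1 = [0, 1, 2, 3] from by decide]
    simp only [pvA_while, pv_body_eq, List.flatMap_cons, List.flatMap_nil, List.append_assoc,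
      List.append_nil]
  calc (PySem.List.pyRange 0 size 1).foldl (fun lines i1 => pvA_while size i1 lines 4) []
      = (PySem.List.pyRange 0 size 1).foldl
          (fun lines i1 => lines ++ (PySem.List.pyRange 0 4 1).flatMap (fun _ => pvBlock size i1)) [] := by
        apply PySem.List.foldl_congr_mem; intro lines i1 _; exact h i1 lines
    _ = _ := by rw [PySem.List.foldl_append_eq_flatMap]; simp

-- ---- B-side reduction to pvNest ----

-- map over a length-a*c range splits into an a-by-c double loop
lemma pv_split_nat {β : Type} (n : Nat) (c : Int) (hc : 0 < c) (f : Int → β) :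
    (PySem.List.pyRange 0 ((n : Int) * c) 1).map f
      = (PySem.List.pyRange 0 (n : Int) 1).flatMap (fun i =>
          (PySem.List.pyRange 0 c 1).map (fun j => f (i * c + j))) := by
  induction n with
  | zero => simp [PySem.List.pyRange_one_eq_nil]
  | succ n ih =>
    have h1 : ((n : Int)) * c ≤ ((n + 1 : Nat) : Int) * c := by push_cast; nlinarith
    have h0 : (0:Int) ≤ (n : Int) * c := by positivity
    rw [PySem.List.pyRange_one_append 0 ((n : Int) * c) (((n+1 : Nat) : Int) * c) h0 h1,
        List.map_append, ih]
    have h2 : ((n + 1 : Nat) : Int) = (n : Int) + 1 := by push_cast; ring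
    rw [h2, PySem.List.pyRange_one_succ_right (by positivity), List.flatMap_append]
    congr 1
    simp only [List.flatMap_cons, List.flatMap_nil, List.append_nil]
    rw [PySem.List.pyRange_one, PySem.List.pyRange_one]
    have h3 : (((n:Int) + 1) * c - (n:Int) * c).toNat = c.toNat := by
      congr 1; ring
    rw [h3]
    simp only [sub_zero, List.map_map]
    apply List.map_congr_left
    intro k _
    simp [Function.comp]

lemma pv_split {β : Type} (a c : Int) (hc : 0 < c) (f : Int → β) :
    (PySem.List.pyRange 0 (a * c) 1).map f
      = (PySem.List.pyRange 0 a 1).flatMap (fun i =>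
          (PySem.List.pyRange 0 c 1).map (fun j => f (i * c + j))) := by
  by_cases ha : 0 ≤ a
  · have : a = ((a.toNat : Nat) : Int) := by omega
    rw [this]; exact pv_split_nat a.toNat c hc f
  · rw [show PySem.List.pyRange 0 (a * c) 1 = [] from PySem.List.pyRange_one_eq_nil (by nlinarith),
        show PySem.List.pyRange 0 a 1 = [] from PySem.List.pyRange_one_eq_nil (by omega)]
    rfl

-- decoding the mixed-radix rank recovers the indices
lemma pv_row_decode (m i1 rep t2 t3 t4 : Int) (hm : 0 < m)
    (h2 : 0 ≤ t2) (h2' : t2 < m) (h3 : 0 ≤ t3) (h3' : t3 < m) (h4 : 0 ≤ t4) (h4' : t4 < m)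
    (hr : 0 ≤ rep) (hr' : rep < 4) :
    pvB_row m ((((i1 * 4 + rep) * m + t2) * m + t3) * m + t4)
      = [0, i1, t2 + 1, if t3 < i1 then t3 else t3 + 1, if t4 < t2 + 1 then t4 else t4 + 1] := by
  unfold pvB_row
  simp only [PySem.Int.mod_eq_emod_of_pos hm, PySem.Int.floordiv_eq_ediv_of_pos hm,
    PySem.Int.floordiv_eq_ediv_of_pos (show (0:Int) < 4 by norm_num)]
  have e1 : ∀ a : Int, (a * m + t4) % m = t4 := by
    intro a; rw [add_comm, mul_comm, Int.add_mul_emod_self_left]; exact Int.emod_eq_of_lt h4 h4'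
  have d1 : ∀ a : Int, (a * m + t4) / m = a := by
    intro a
    rw [add_comm, Int.add_mul_ediv_right _ _ (by omega : m ≠ 0),
      Int.ediv_eq_zero_of_lt h4 h4', zero_add]
  have e2 : ∀ a : Int, (a * m + t3) % m = t3 := by
    intro a; rw [add_comm, mul_comm, Int.add_mul_emod_self_left]; exact Int.emod_eq_of_lt h3 h3'
  have d2 : ∀ a : Int, (a * m + t3) / m = a := by
    intro a
    rw [add_comm, Int.add_mul_ediv_right _ _ (by omega : m ≠ 0),
      Int.ediv_eq_zero_of_lt h3 h3', zero_add]
  have e3 : ∀ a : Int, (a * m + t2) % m = t2 := by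
    intro a; rw [add_comm, mul_comm, Int.add_mul_emod_self_left]; exact Int.emod_eq_of_lt h2 h2'
  have d3 : ∀ a : Int, (a * m + t2) / m = a := by
    intro a
    rw [add_comm, Int.add_mul_ediv_right _ _ (by omega : m ≠ 0),
      Int.ediv_eq_zero_of_lt h2 h2', zero_add]
  have d4 : (i1 * 4 + rep) / 4 = i1 := by omega
  rw [e1, d1, e2, d2, e3, d3, d4]

-- shift: for i2 in range(1, size) ≡ for t2 in range(size-1) with i2 = t2+1
lemma pv_shift {β : Type} (size : Int) (g : Int → List β) :
    (PySem.List.pyRange 1 size 1).flatMap g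
      = (PySem.List.pyRange 0 (size - 1) 1).flatMap (fun t => g (t + 1)) := by
  rw [PySem.List.pyRange_one, PySem.List.pyRange_one]
  simp only [sub_zero, List.flatMap_map]
  apply List.flatMap_congr
  intro k _
  simp [add_comm]

-- a filtered range x ≠ c is the +1-shifted decode of a range one shorter
lemma pv_skip (s c : Int) (h0 : 0 ≤ c) (hc : c < s) :
    (PySem.List.pyRange 0 s 1).filter (fun x => x != c)
      = (PySem.List.pyRange 0 (s - 1) 1).map (fun t => if t < c then t else t + 1) := by
  rw [PySem.List.pyRange_one_append 0 c s h0 (by omega),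
      PySem.List.pyRange_one_cons hc,
      PySem.List.pyRange_one_append 0 c (s - 1) h0 (by omega)]
  rw [List.filter_append, List.filter_cons, List.map_append]
  simp only [bne_self_eq_false, Bool.false_eq_true, if_false]
  congr 1
  · rw [List.filter_eq_self.mpr]
    · symm
      calc (PySem.List.pyRange 0 c 1).map (fun t => if t < c then t else t + 1)
          = (PySem.List.pyRange 0 c 1).map id := by
            apply List.map_congr_left; intro x hx
            have := (PySem.List.mem_pyRange_one.mp hx).2
            simp [this]
        _ = _ := List.map_id _
    · intro x hx
      have := (PySem.List.mem_pyRange_one.mp hx).2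
      simp [bne_iff_ne]; omega
  · rw [List.filter_eq_self.mpr]
    · rw [PySem.List.pyRange_one, PySem.List.pyRange_one]
      have : (s - 1 - c).toNat = (s - (c + 1)).toNat := by omega
      rw [this, List.map_map]
      apply List.map_congr_left
      intro k hk
      have : ¬ (c + (k : Int) < c) := by omega
      simp [Function.comp, this]; ring
    · intro x hx
      have := (PySem.List.mem_pyRange_one.mp hx).1
      simp [bne_iff_ne]; omega

lemma pv_block_decode (size i1 : Int) (_h2 : 2 ≤ size) (hi0 : 0 ≤ i1) (hi : i1 < size) :
    (PySem.List.pyRange 0 (size - 1) 1).flatMap (fun t2 =>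
      (PySem.List.pyRange 0 (size - 1) 1).flatMap (fun t3 =>
        (PySem.List.pyRange 0 (size - 1) 1).map (fun t4 =>
          [0, i1, t2 + 1, if t3 < i1 then t3 else t3 + 1, if t4 < t2 + 1 then t4 else t4 + 1])))
      = pvBlock size i1 := by
  unfold pvBlock
  rw [pv_shift size, pv_skip size i1 hi0 hi]
  apply List.flatMap_congr
  intro t2 ht2
  have ht2' := PySem.List.mem_pyRange_one.mp ht2
  rw [pv_skip size (t2 + 1) (by omega) (by omega)]
  simp only [List.flatMap_map, List.map_map]
  apply List.flatMap_congr
  intro t3 _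
  apply List.map_congr_left
  intro t4 _
  rfl

lemma pv_B_eq_nest (size : Int) : get_lines_4_alt size = pvNest size := by
  unfold get_lines_4_alt
  by_cases h : size ≤ 1
  · rw [if_pos h]
    unfold pvNest
    by_cases h0 : size ≤ 0
    · rw [show PySem.List.pyRange 0 size 1 = [] from PySem.List.pyRange_one_eq_nil (by omega)]; rfl
    · have hs : size = 1 := by omega
      subst hs; decide
  · rw [if_neg h]
    have hm : (0:Int) < size - 1 := by omega
    set m := size - 1 with hmdef
    have htot : 4 * size * m * m * m = size * (4 * (m * (m * m))) := by ring
    rw [PySem.List.foldl_append_singleton_eq_map, htot,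
        pv_split size (4 * (m * (m * m))) (by positivity) (pvB_row m)]
    unfold pvNest
    apply List.flatMap_congr
    intro i1 hi1
    have hi1' := PySem.List.mem_pyRange_one.mp hi1
    rw [show (4 * (m * (m * m))) = (4:Int) * (m * (m * m)) from rfl,
        pv_split 4 (m * (m * m)) (by positivity)]
    apply List.flatMap_congr
    intro rep hrep
    have hrep' := PySem.List.mem_pyRange_one.mp hrep
    rw [pv_split m (m * m) (by positivity)]
    rw [← pv_block_decode size i1 (by omega) hi1'.1 hi1'.2]
    apply List.flatMap_congr
    intro t2 ht2
    have ht2' := PySem.List.mem_pyRange_one.mp ht2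
    rw [pv_split m m hm]
    apply List.flatMap_congr
    intro t3 ht3
    have ht3' := PySem.List.mem_pyRange_one.mp ht3
    apply List.map_congr_left
    intro t4 ht4
    have ht4' := PySem.List.mem_pyRange_one.mp ht4
    have harg : i1 * (4 * (m * (m * m))) + (rep * (m * (m * m)) + (t2 * (m * m) + (t3 * m + t4)))
        = (((i1 * 4 + rep) * m + t2) * m + t3) * m + t4 := by ring
    rw [harg, pv_row_decode m i1 rep t2 t3 t4 hm ht2'.1 ht2'.2 ht3'.1 ht3'.2 ht4'.1 ht4'.2
        hrep'.1 hrep'.2]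

-- ===== VERDICT (by name: the statement is the Claim_ definition above) =====
theorem get_lines_4_spec : Claim_equal_get_lines_4 := by
  intro size _
  unfold Spec_get_lines_4
  rw [pv_A_eq_nest, pv_B_eq_nest]
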